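-- pv_equiv track=rewrite | github.com/daniel-reich/ubiquitous-fiesta | CMqa7tAtffudQ7hs4_20.py | sorting_steps
-- ===== SOURCE A (Python) =====
-- def sorting_steps(lst):
--   def swap(lst, swaps = []):
--     if lst == sorted(lst):
--       return swaps
--     else:
--       s = []
--       for n in range(1, len(lst)):
--         pi = lst[n-1]
--         ci = lst[n]
--         if ci < pi:
--           spi = ci
--           sci = pi
--           lst[n-1] = spi
--           lst[n] = sci
--           swaps.append(tuple([n-1, n]))
--           break
--       return swap(lst,swaps)
--   swaps = swap(lst)
--   return swaps
-- ===== SOURCE B (Python) =====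
-- def sorting_steps(lst):
--     # Insertion sort with adjacent swaps: bubble each element left into the sorted prefix,
--     # recording each swap. Mutates lst in place (sorts it), like A.
--     swaps = []
--     for j in range(1, len(lst)):
--         k = j
--         while k >= 1 and lst[k] < lst[k - 1]:
--             lst[k - 1], lst[k] = lst[k], lst[k - 1]
--             swaps.append((k - 1, k))
--             k -= 1
--     return swaps
-- ===== Notes on version B (the rewrite author's own statement) =====
-- stated objective: alternative
-- what changed: Replaced the recursive restart-from-scratch pass (per recorded swap: a full sorted() check plus a rescan from index 0 for the first inversion) with a standard insertion sort that bubbles each element left through the sorted prefix with adjacent swaps, recording the same swap sequence.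
import Mathlib
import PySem

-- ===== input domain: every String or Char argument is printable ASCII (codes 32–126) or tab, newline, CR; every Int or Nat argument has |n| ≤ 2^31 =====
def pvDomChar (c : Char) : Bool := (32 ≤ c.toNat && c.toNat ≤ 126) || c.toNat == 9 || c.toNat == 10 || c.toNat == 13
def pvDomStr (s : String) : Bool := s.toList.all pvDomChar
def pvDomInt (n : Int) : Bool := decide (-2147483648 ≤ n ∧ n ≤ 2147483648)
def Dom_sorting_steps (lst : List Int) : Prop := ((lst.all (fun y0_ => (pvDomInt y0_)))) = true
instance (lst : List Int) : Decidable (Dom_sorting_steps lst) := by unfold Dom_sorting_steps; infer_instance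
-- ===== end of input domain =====

-- B replaces A's recursive restart (full sorted() check + rescan from index 0 per swap) by a
-- plain insertion sort with adjacent swaps (outer pass over positions, inner loop bubbling each
-- element left), a different algorithm of the same purpose; in Python both A and B sort the
-- argument list in place — the equivalence proved here is about the return value (the list of
-- swap index pairs) only.

-- ===== PORT A =====
-- the adjacent swap lst[n-1],lst[n] = lst[n],lst[n-1] of A (indices in range)
def pvSwapAt (l : List Int) (i : Nat) : List Int :=
  (l.set (i - 1) (l.getD i 0)).set i (l.getD (i - 1) 0)

-- termination measure for A's port: number of inversions (cited in decreasing_by only)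
def pvInv : List Int → Nat
  | [] => 0
  | x :: xs => xs.countP (fun y => decide (y < x)) + pvInv xs

lemma pvSwapAt_perm : ∀ (l : List Int) (i : Nat), 1 ≤ i → i < l.length →
    (pvSwapAt l i).Perm l
  | [], i, _, h2 => absurd h2 (Nat.not_lt_zero i)
  | [x], 1, _, h2 => absurd h2 (lt_irrefl 1)
  | x :: y :: b, 1, _, _ => List.Perm.swap x y b
  | x :: xs, (k + 2), _, h2 =>
      List.Perm.cons x (pvSwapAt_perm xs (k + 1) (Nat.le_add_left 1 k)
        (Nat.lt_of_succ_lt_succ h2))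

lemma pvInv_swap : ∀ (l : List Int) (i : Nat), 1 ≤ i → i < l.length →
    l.getD i 0 < l.getD (i - 1) 0 → pvInv (pvSwapAt l i) + 1 = pvInv l
  | [], i, _, h2, _ => absurd h2 (Nat.not_lt_zero i)
  | [x], 1, _, h2, _ => absurd h2 (lt_irrefl 1)
  | x :: y :: b, 1, _, _, h3 => by
      have hyx : y < x := h3
      show (List.countP (fun z => decide (z < y)) (x :: b)
            + (List.countP (fun z => decide (z < x)) b + pvInv b)) + 1
          = List.countP (fun z => decide (z < x)) (y :: b)
            + (List.countP (fun z => decide (z < y)) b + pvInv b)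
      have e1 : (decide (x < y)) = false := decide_eq_false (not_lt.mpr hyx.le)
      have e2 : (decide (y < x)) = true := decide_eq_true hyx
      rw [List.countP_cons, List.countP_cons, e1, e2]
      simp
      omega
  | x :: xs, (k + 2), _, h2, h3 => by
      have hx : k + 1 < xs.length := Nat.lt_of_succ_lt_succ h2
      have ihr := pvInv_swap xs (k + 1) (Nat.le_add_left 1 k) hx h3
      show List.countP (fun z => decide (z < x)) (pvSwapAt xs (k + 1))
            + pvInv (pvSwapAt xs (k + 1)) + 1
          = List.countP (fun z => decide (z < x)) xs + pvInv xs
      rw [(pvSwapAt_perm xs (k + 1) (Nat.le_add_left 1 k) hx).countP_eq]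
      omega

-- the for-loop of A's helper 'swap': first n ≥ start with lst[n] < lst[n-1]
def pvFirstInv (l : List Int) (n : Nat) : Option Nat :=
  if h : n < l.length then
    if l.getD n 0 < l.getD (n - 1) 0 then some n
    else pvFirstInv l (n + 1)
  else none
termination_by l.length - n
decreasing_by exact Nat.sub_succ_lt_self l.length n h

lemma pvFirstInv_some (l : List Int) :
    ∀ (k n m : Nat), l.length - n ≤ k → pvFirstInv l n = some m →
      n ≤ m ∧ m < l.length ∧ l.getD m 0 < l.getD (m - 1) 0 := by
  intro k
  induction k with
  | zero =>
      intro n m hk h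
      rw [pvFirstInv,
        dif_neg (not_lt.mpr (Nat.le_of_sub_eq_zero (Nat.le_zero.mp hk)))] at h
      cases h
  | succ k ih =>
      intro n m hk h
      rw [pvFirstInv] at h
      rcases Nat.lt_or_ge n l.length with hn | hn
      · rw [dif_pos hn] at h
        by_cases hlt : l.getD n 0 < l.getD (n - 1) 0
        · rw [if_pos hlt] at h
          cases h
          exact ⟨le_rfl, hn, hlt⟩
        · rw [if_neg hlt] at h
          obtain ⟨h1, h2, h3⟩ := ih (n + 1) m (by omega) h
          exact ⟨Nat.le_of_succ_le h1, h2, h3⟩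
      · rw [dif_neg (not_lt.mpr hn)] at h
        cases h

lemma pvGoDec (l : List Int) (n : Nat) (hf : pvFirstInv l 1 = some n) :
    pvInv (pvSwapAt l n) < pvInv l := by
  have h := pvFirstInv_some l (l.length - 1) 1 n le_rfl hf
  rw [← pvInv_swap l n h.1 h.2.1 h.2.2]
  exact Nat.lt_succ_self _

-- A: recursive 'swap' — sorted() check, scan from index 1 for the first inversion, swap, recurse.
def sorting_steps_go (l : List Int) (swaps : List (Int × Int)) : List (Int × Int) :=
  if l = PySem.List.sorted l (fun x => x) then swaps
  else
    match _hf : pvFirstInv l 1 with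
    | some n =>
        sorting_steps_go (pvSwapAt l n) (swaps ++ [((n : Int) - 1, (n : Int))])
    | none => swaps
      -- unreachable: a list that fails the sorted() check has an adjacent inversion;
      -- the Python would recurse forever here (totality guard only)
termination_by pvInv l
decreasing_by exact pvGoDec l n _hf

def sorting_steps (lst : List Int) : List (Int × Int) :=
  sorting_steps_go lst []

-- ===== PORT B =====
-- B's inner while loop: bubble the element at position k left while it is smaller.
def pvBubble (l : List Int) (k : Nat) (swaps : List (Int × Int)) :
    List Int × List (Int × Int) :=
  match k with
  | 0 => (l, swaps)
  | Nat.succ k' =>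
      if l.getD (k' + 1) 0 < l.getD k' 0 then
        pvBubble ((l.set (k' + 1) (l.getD k' 0)).set k' (l.getD (k' + 1) 0)) k'
          (swaps ++ [((k' : Int), (k' : Int) + 1)])
      else (l, swaps)

-- termination fact pvPass cites: bubbling preserves the length
lemma pvBubble_length : ∀ (k : Nat) (l : List Int) (swaps : List (Int × Int)),
    (pvBubble l k swaps).1.length = l.length
  | 0, _, _ => rfl
  | Nat.succ k', l, swaps => by
      rw [pvBubble]
      split
      · rw [pvBubble_length k']; simp
      · rfl

-- B's outer for loop over j = 1 .. len-1
def pvPass (l : List Int) (j : Nat) (swaps : List (Int × Int)) : List (Int × Int) :=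
  if _h : j < l.length then
    pvPass (pvBubble l j swaps).1 (j + 1) (pvBubble l j swaps).2
  else swaps
termination_by l.length - j
decreasing_by rw [pvBubble_length]; omega

def sorting_steps_alt (lst : List Int) : List (Int × Int) :=
  pvPass lst 1 []

-- ===== PRECONDITION & SPEC =====
def Spec_sorting_steps (lst : List Int) (out : List (Int × Int)) : Prop := out = sorting_steps_alt lst
instance (lst : List Int) (out : List (Int × Int)) : Decidable (Spec_sorting_steps lst out) := by unfold Spec_sorting_steps; infer_instance

-- ===== CLAIM (what is proved, stated in full; the proofs are below) =====
def Claim_equal_sorting_steps : Prop := ∀ (lst : List Int), Dom_sorting_steps lst → Spec_sorting_steps lst (sorting_steps lst)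

-- ===== LEMMAS AND PROOFS =====

-- the pairs strictly below index i are already in order
def pvSortedBelow (l : List Int) (i : Nat) : Prop :=
  ∀ j, 1 ≤ j → j < i → j < l.length → l.getD (j - 1) 0 ≤ l.getD j 0

lemma getD_mono_of_sortedBelow (l : List Int) (h : pvSortedBelow l l.length) :
    ∀ b a, a ≤ b → b < l.length → l.getD a 0 ≤ l.getD b 0 := by
  intro b
  induction b with
  | zero => intro a hab _; rw [Nat.le_zero.mp hab]
  | succ b ih =>
      intro a hab hb
      rcases Nat.lt_or_ge a (b + 1) with hlt | hge
      · exact le_trans (ih a (by omega) (by omega))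
          (by simpa using h (b + 1) (by omega) hb hb)
      · obtain rfl : a = b + 1 := by omega
        exact le_rfl

lemma pairwise_of_sortedBelow (l : List Int) (h : pvSortedBelow l l.length) :
    l.Pairwise (fun a b => a ≤ b) := by
  rw [List.pairwise_iff_getElem]
  intro p q hp hq hpq
  have := getD_mono_of_sortedBelow l h q p (le_of_lt hpq) hq
  rwa [List.getD_eq_getElem?_getD, List.getD_eq_getElem?_getD,
    List.getElem?_eq_getElem hp, List.getElem?_eq_getElem hq] at this

lemma getD_pair_le_of_pairwise (l : List Int)
    (hp : l.Pairwise (fun a b : Int => a ≤ b)) (i : Nat) (h1 : 1 ≤ i)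
    (hi : i < l.length) : l.getD (i - 1) 0 ≤ l.getD i 0 := by
  have := (List.pairwise_iff_getElem.mp hp) (i - 1) i (by omega) hi (by omega)
  rwa [List.getD_eq_getElem?_getD, List.getD_eq_getElem?_getD,
    List.getElem?_eq_getElem (show i - 1 < l.length by omega),
    List.getElem?_eq_getElem hi]

lemma getD_pvSwapAt_other (l : List Int) (i m : Nat) (hm1 : m ≠ i - 1) (hm2 : m ≠ i) :
    (pvSwapAt l i).getD m 0 = l.getD m 0 := by
  rw [pvSwapAt, List.getD_eq_getElem?_getD, List.getElem?_set_ne (by omega),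
    List.getElem?_set_ne (by omega), ← List.getD_eq_getElem?_getD]

lemma getD_pvSwapAt_self (l : List Int) (i : Nat) (hi : i < l.length) :
    (pvSwapAt l i).getD i 0 = l.getD (i - 1) 0 := by
  rw [pvSwapAt, List.getD_eq_getElem?_getD, List.getElem?_set_self
    (by simpa using hi)]
  rfl

lemma getD_pvSwapAt_pred (l : List Int) (i : Nat) (h1 : 1 ≤ i) (hi : i < l.length) :
    (pvSwapAt l i).getD (i - 1) 0 = l.getD i 0 := by
  rw [pvSwapAt, List.getD_eq_getElem?_getD, List.getElem?_set_ne (by omega),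
    List.getElem?_set_self (by omega)]
  rfl

-- B's in-place swap is A's pvSwapAt
lemma pvBubble_swap_eq (l : List Int) (k' : Nat) :
    (l.set (k' + 1) (l.getD k' 0)).set k' (l.getD (k' + 1) 0) = pvSwapAt l (k' + 1) := by
  rw [pvSwapAt]
  show _ = (l.set k' (l.getD (k' + 1) 0)).set (k' + 1) (l.getD k' 0)
  exact List.set_comm _ _ (by omega)

lemma pvFirstInv_eq_some (l : List Int) (i : Nat) (hi : i < l.length)
    (hinv : l.getD i 0 < l.getD (i - 1) 0) :
    ∀ (k j : Nat), i - j ≤ k → 1 ≤ j → j ≤ i →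
      (∀ m, j ≤ m → m < i → ¬ l.getD m 0 < l.getD (m - 1) 0) →
      pvFirstInv l j = some i := by
  intro k
  induction k with
  | zero =>
      intro j hk h1 h2 _
      obtain rfl : j = i := by omega
      rw [pvFirstInv, dif_pos hi, if_pos hinv]
  | succ k ih =>
      intro j hk h1 h2 hno
      rcases Nat.eq_or_lt_of_le h2 with rfl | hji
      · rw [pvFirstInv, dif_pos hi, if_pos hinv]
      · rw [pvFirstInv, dif_pos (by omega), if_neg (hno j le_rfl hji)]
        exact ih (j + 1) (by omega) (by omega) (by omega)
          (fun m hm1 hm2 => hno m (by omega) hm2)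

lemma unsorted_of_inv (l : List Int) (i : Nat) (h1 : 1 ≤ i) (hi : i < l.length)
    (hinv : l.getD i 0 < l.getD (i - 1) 0) :
    l ≠ PySem.List.sorted l (fun x => x) := by
  intro he
  have hp : l.Pairwise (fun a b : Int => a ≤ b) := by
    have := PySem.List.sorted_pairwise l (fun x : Int => x)
    rwa [← he] at this
  exact absurd hinv (not_lt.mpr (getD_pair_le_of_pairwise l hp i h1 hi))

-- one A-step at the first inversion i
lemma go_step (l : List Int) (i : Nat) (acc : List (Int × Int)) (h1 : 1 ≤ i)
    (hi : i < l.length) (hinv : l.getD i 0 < l.getD (i - 1) 0)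
    (hsb : ∀ m, 1 ≤ m → m < i → ¬ l.getD m 0 < l.getD (m - 1) 0) :
    sorting_steps_go l acc
      = sorting_steps_go (pvSwapAt l i) (acc ++ [((i : Int) - 1, (i : Int))]) := by
  have hfi : pvFirstInv l 1 = some i :=
    pvFirstInv_eq_some l i hi hinv (i - 1) 1 le_rfl le_rfl h1 hsb
  conv_lhs => rw [sorting_steps_go]
  rw [if_neg (unsorted_of_inv l i h1 hi hinv)]
  split
  · rename_i n heq
    rw [hfi] at heq
    obtain rfl : n = i := by simpa using heq.symm
    rfl
  · rename_i heq
    rw [hfi] at heq; exact absurd heq (by simp)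

-- the inner bubbling loop simulates a run of A-steps and leaves the prefix sorted
lemma bubble_sim : ∀ (k : Nat) (top : Nat) (l : List Int) (acc : List (Int × Int)),
    k ≤ top → top < l.length →
    (∀ m, 1 ≤ m → m ≤ top → m ≠ k → l.getD (m - 1) 0 ≤ l.getD m 0) →
    (1 ≤ k → k < top → l.getD (k - 1) 0 ≤ l.getD (k + 1) 0) →
    sorting_steps_go l acc
        = sorting_steps_go (pvBubble l k acc).1 (pvBubble l k acc).2
      ∧ pvSortedBelow (pvBubble l k acc).1 (top + 1) := by
  intro k
  induction k with
  | zero =>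
      intro top l acc _ _ hrest _
      refine ⟨rfl, ?_⟩
      intro j hj1 hj2 hj3
      exact hrest j hj1 (by omega) (by omega)
  | succ k' ih =>
      intro top l acc hk htop hrest hbridge
      rw [pvBubble]
      by_cases hlt : l.getD (k' + 1) 0 < l.getD k' 0
      · rw [if_pos hlt, pvBubble_swap_eq]
        have hswlt : l.getD (k' + 1) 0 < l.getD ((k' + 1) - 1) 0 := by
          simpa using hlt
        have hstep := go_step l (k' + 1) acc (by omega) (by omega) hswlt
          (fun m hm1 hm2 => not_lt.mpr (hrest m hm1 (by omega) (by omega)))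
        have hlen : (pvSwapAt l (k' + 1)).length = l.length := by
          simp [pvSwapAt]
        have hrest' : ∀ m, 1 ≤ m → m ≤ top → m ≠ k' →
            (pvSwapAt l (k' + 1)).getD (m - 1) 0 ≤ (pvSwapAt l (k' + 1)).getD m 0 := by
          intro m hm1 hm2 hmk
          rcases Nat.lt_trichotomy m (k' + 1) with hm | hm | hm
          · -- m < k' + 1, m ≠ k' so m < k': both indices untouched
            rw [getD_pvSwapAt_other l (k' + 1) m (by omega) (by omega),
              getD_pvSwapAt_other l (k' + 1) (m - 1) (by omega) (by omega)]
            exact hrest m hm1 (by omega) (by omega)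
          · -- m = k' + 1: the freshly swapped pair is sorted
            subst hm
            rw [getD_pvSwapAt_self l (k' + 1) (by omega),
              getD_pvSwapAt_pred l (k' + 1) (by omega) (by omega)]
            simpa using le_of_lt hswlt
          · rcases Nat.eq_or_lt_of_le hm with hm' | hm'
            · -- m = k' + 2: uses the bridge l[k'] ≤ l[k'+2]
              have hmm : m = k' + 2 := by omega
              subst hmm
              rw [getD_pvSwapAt_other l (k' + 1) (k' + 2) (by omega) (by omega)]
              have he1 : ((k' + 2) - 1 : Nat) = k' + 1 := by omega
              rw [he1, getD_pvSwapAt_self l (k' + 1) (by omega)]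
              have := hbridge (by omega) (by omega)
              simpa using this
            · -- m > k' + 2: both indices untouched
              rw [getD_pvSwapAt_other l (k' + 1) m (by omega) (by omega),
                getD_pvSwapAt_other l (k' + 1) (m - 1) (by omega) (by omega)]
              exact hrest m hm1 hm2 (by omega)
        have hbridge' : 1 ≤ k' → k' < top →
            (pvSwapAt l (k' + 1)).getD (k' - 1) 0 ≤ (pvSwapAt l (k' + 1)).getD (k' + 1) 0 := by
          intro hk1 hk2
          rw [getD_pvSwapAt_other l (k' + 1) (k' - 1) (by omega) (by omega),
            getD_pvSwapAt_self l (k' + 1) (by omega)]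
          have := hrest k' hk1 (by omega) (by omega)
          simpa using this
        obtain ⟨he, hs⟩ := ih top (pvSwapAt l (k' + 1))
          (acc ++ [((k' : Int), (k' : Int) + 1)]) (by omega) (by omega) hrest' hbridge'
        refine ⟨?_, hs⟩
        have hc1 : ((k' + 1 : Nat) : Int) - 1 = (k' : Int) := by push_cast; ring
        have hc2 : ((k' + 1 : Nat) : Int) = (k' : Int) + 1 := by push_cast; ring
        rw [hstep, hc1, hc2]
        exact he
      · rw [if_neg hlt]
        refine ⟨rfl, ?_⟩
        intro j hj1 hj2 hj3
        by_cases hjk : j = k' + 1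
        · subst hjk; simpa using not_lt.mp hlt
        · exact hrest j hj1 (by omega) (by omega)

-- past the end with a sorted prefix, A is done too
lemma terminal_eq (l : List Int) (j : Nat) (acc : List (Int × Int))
    (hj : l.length ≤ j) (hsb : pvSortedBelow l j) :
    sorting_steps_go l acc = acc := by
  have hsorted : l = PySem.List.sorted l (fun x => x) :=
    (PySem.List.sorted_eq_self_of_pairwise l _
      (pairwise_of_sortedBelow l (fun m hm1 hm2 hm3 => hsb m hm1 (by omega) hm3))).symm
  rw [sorting_steps_go, if_pos hsorted]

-- the outer pass keeps the invariant "prefix below j sorted"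
lemma pass_sim : ∀ (fuel j : Nat) (l : List Int) (acc : List (Int × Int)),
    l.length - j ≤ fuel → 1 ≤ j → pvSortedBelow l j →
    pvPass l j acc = sorting_steps_go l acc := by
  intro fuel
  induction fuel with
  | zero =>
      intro j l acc hf h1 hsb
      rw [pvPass, dif_neg (by omega), terminal_eq l j acc (by omega) hsb]
  | succ fuel ih =>
      intro j l acc hf h1 hsb
      by_cases hj : j < l.length
      · rw [pvPass, dif_pos hj]
        obtain ⟨he, hs⟩ := bubble_sim j j l acc le_rfl hj
          (fun m hm1 hm2 hm3 => hsb m hm1 (by omega) (by omega))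
          (fun _ h => absurd h (lt_irrefl j))
        rw [ih (j + 1) (pvBubble l j acc).1 (pvBubble l j acc).2
          (by rw [pvBubble_length]; omega) (by omega) hs, he]
      · rw [pvPass, dif_neg hj, terminal_eq l j acc (by omega) hsb]

-- ===== VERDICT (by name: the statement is the Claim_ definition above) =====
theorem sorting_steps_spec : Claim_equal_sorting_steps := by
  intro lst _
  unfold Spec_sorting_steps sorting_steps sorting_steps_alt
  exact (pass_sim (lst.length - 1) 1 lst [] le_rfl le_rfl
    (fun j hj1 hj2 _ => by omega)).symm
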